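-- pv_equiv track=rewrite | github.com/DanielGalandak/STEP_IT_homework | 07/07_countries.py | get_boundary_points
-- ===== SOURCE A (Python) =====
-- def get_boundary_points(data: dict, lowest_populated_country: int, highest_populated_country: int):
--     """
--     Finds the countries with the lowest and highest populations.
--     """
--     country_1 = None
--     country_2 = None
--     for key, value in data.items():
--         if value == lowest_populated_country:
--             country_1 = key
--         if value == highest_populated_country:
--             country_2 = key
--     return country_1, country_2
-- ===== SOURCE B (Python) =====
-- def get_boundary_points(data: dict, lowest_populated_country: int, highest_populated_country: int):
--     """
--     Finds the countries with the lowest and highest populations.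
--     """
--     def rfind(target):
--         # first match scanning back-to-front = last match in insertion order
--         for key, value in reversed(list(data.items())):
--             if value == target:
--                 return key
--         return None
--     return rfind(lowest_populated_country), rfind(highest_populated_country)
-- ===== Notes on version B (the rewrite author's own statement) =====
-- stated objective: alternative
-- what changed: A's single forward pass that overwrites two accumulators to the end is replaced by two staged back-to-front searches with early exit: the first match in reverse order is returned immediately, which equals A's last forward match.
import Mathlib
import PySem

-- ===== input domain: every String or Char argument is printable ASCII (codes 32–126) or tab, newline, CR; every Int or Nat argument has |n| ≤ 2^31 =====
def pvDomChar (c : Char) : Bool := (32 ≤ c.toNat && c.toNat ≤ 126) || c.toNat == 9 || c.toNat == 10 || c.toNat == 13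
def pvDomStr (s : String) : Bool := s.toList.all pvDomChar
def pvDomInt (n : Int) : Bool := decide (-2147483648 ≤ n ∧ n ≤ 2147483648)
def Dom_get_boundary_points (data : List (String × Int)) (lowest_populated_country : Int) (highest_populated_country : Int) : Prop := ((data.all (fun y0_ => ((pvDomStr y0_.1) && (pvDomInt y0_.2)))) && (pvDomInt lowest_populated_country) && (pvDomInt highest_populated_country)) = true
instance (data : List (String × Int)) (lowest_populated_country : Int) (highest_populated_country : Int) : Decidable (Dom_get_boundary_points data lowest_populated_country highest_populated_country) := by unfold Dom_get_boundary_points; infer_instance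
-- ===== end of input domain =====

-- B replaces A's single forward overwrite-to-the-end pass with two staged back-to-front
-- searches with early exit (first match in reverse = last match forward); alternative, same O(n).

-- ===== PORT A =====
-- single loop over items, two overwriting assignments per element
def get_boundary_points (data : List (String × Int)) (lowest_populated_country : Int) (highest_populated_country : Int) : Option String × Option String :=
  data.foldl
    (fun c kv =>
      let c1 := if kv.2 == lowest_populated_country then some kv.1 else c.1
      let c2 := if kv.2 == highest_populated_country then some kv.1 else c.2
      (c1, c2))
    (none, none)

-- ===== PORT B =====
-- rfind: scan the reversed items, return the first key whose value matches (early exit)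
def pvRfind (target : Int) : List (String × Int) → Option String
  | [] => none
  | kv :: rest => if kv.2 == target then some kv.1 else pvRfind target rest

def get_boundary_points_alt (data : List (String × Int)) (lowest_populated_country : Int) (highest_populated_country : Int) : Option String × Option String :=
  (pvRfind lowest_populated_country data.reverse, pvRfind highest_populated_country data.reverse)

-- ===== PRECONDITION & SPEC =====
def Spec_get_boundary_points (data : List (String × Int)) (lowest_populated_country : Int) (highest_populated_country : Int) (out : Option String × Option String) : Prop := out = get_boundary_points_alt data lowest_populated_country highest_populated_country
instance (data : List (String × Int)) (lowest_populated_country : Int) (highest_populated_country : Int) (out : Option String × Option String) : Decidable (Spec_get_boundary_points data lowest_populated_country highest_populated_country out) := by unfold Spec_get_boundary_points; infer_instance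

-- ===== CLAIM (what is proved, stated in full; the proofs are below) =====
def Claim_equal_get_boundary_points : Prop := ∀ (data : List (String × Int)) (lowest_populated_country : Int) (highest_populated_country : Int), Dom_get_boundary_points data lowest_populated_country highest_populated_country → Spec_get_boundary_points data lowest_populated_country highest_populated_country (get_boundary_points data lowest_populated_country highest_populated_country)

-- ===== LEMMAS AND PROOFS =====

-- A's paired fold splits into two independent folds
theorem pv_foldl_pair (data : List (String × Int)) (f g : Option String → String × Int → Option String)
    (a b : Option String) :
    data.foldl (fun c kv => (f c.1 kv, g c.2 kv)) (a, b)
      = (data.foldl f a, data.foldl g b) := by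
  induction data generalizing a b with
  | nil => rfl
  | cons kv rest ih => simpa using ih (f a kv) (g b kv)

theorem pv_rfind_append_single (x : Int) (l : List (String × Int)) (kv : String × Int) :
    pvRfind x (l ++ [kv]) = (pvRfind x l).or (if kv.2 == x then some kv.1 else none) := by
  induction l with
  | nil => cases h : (kv.2 == x) <;> simp [pvRfind, h]
  | cons a rest ih =>
      by_cases h : a.2 = x
      · simp [pvRfind, h]
      · simp [pvRfind, h, ih]

-- the last-wins fold equals the first match of the reversed list (over any accumulator)
theorem pv_fold_eq_rfind (x : Int) (data : List (String × Int)) (acc : Option String) :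
    data.foldl (fun c kv => if kv.2 == x then some kv.1 else c) acc
      = (pvRfind x data.reverse).or acc := by
  induction data generalizing acc with
  | nil => rfl
  | cons kv rest ih =>
      simp only [List.foldl_cons, List.reverse_cons, pv_rfind_append_single, Option.or_assoc, ih]
      congr 1
      cases h : (kv.2 == x) <;> simp

-- ===== VERDICT (by name: the statement is the Claim_ definition above) =====
theorem get_boundary_points_spec : Claim_equal_get_boundary_points := by
  intro data l h _
  unfold Spec_get_boundary_points get_boundary_points get_boundary_points_alt
  have := pv_foldl_pair data
    (fun c kv => if kv.2 == l then some kv.1 else c)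
    (fun c kv => if kv.2 == h then some kv.1 else c) none none
  simp only [] at this ⊢
  rw [this, pv_fold_eq_rfind l data none, pv_fold_eq_rfind h data none]
  simp
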